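-- pv_equiv track=rewrite | github.com/BeverlyLiu/fileParsing-unitTest | file_parsing_module.py | BuildTailList
-- ===== SOURCE A (Python) =====
-- def BuildTailList(all_file_contents):
--     '''
--     This function will loop over the variable populated in ReadFileContents and append to another list call tail_list
--     all the lines that are below those that begin with ATOM (the lines left over).
--     :param all_file_contents:
--     :return: tail_list
--     '''
--
--     tail_list = []
--     after_atom = False
--     for line in all_file_contents:
--         if not line.startswith('ATOM') and after_atom == False:
--             continue
--         elif line.startswith('ATOM'):
--             after_atom = True
--             continue
--         elif not line.startswith('ATOM') and after_atom == True:
--             tail_list.append(line)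
--
--     return tail_list
-- ===== SOURCE B (Python) =====
-- def BuildTailList(all_file_contents):
--     """Two-phase: find the first ATOM line, then keep the non-ATOM lines of the tail."""
--     tail = _after_first_atom(list(all_file_contents))
--     return [line for line in tail if not line.startswith('ATOM')]
--
--
-- def _after_first_atom(lines):
--     for i, line in enumerate(lines):
--         if line.startswith('ATOM'):
--             return lines[i + 1:]
--     return []
-- ===== Notes on version B (the rewrite author's own statement) =====
-- stated objective: simpler
-- what changed: Replaces the boolean-flag state machine with a two-phase decomposition: locate the first ATOM line and take the list after it, then a comprehension keeps the non-ATOM lines of that tail.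
import Mathlib
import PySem

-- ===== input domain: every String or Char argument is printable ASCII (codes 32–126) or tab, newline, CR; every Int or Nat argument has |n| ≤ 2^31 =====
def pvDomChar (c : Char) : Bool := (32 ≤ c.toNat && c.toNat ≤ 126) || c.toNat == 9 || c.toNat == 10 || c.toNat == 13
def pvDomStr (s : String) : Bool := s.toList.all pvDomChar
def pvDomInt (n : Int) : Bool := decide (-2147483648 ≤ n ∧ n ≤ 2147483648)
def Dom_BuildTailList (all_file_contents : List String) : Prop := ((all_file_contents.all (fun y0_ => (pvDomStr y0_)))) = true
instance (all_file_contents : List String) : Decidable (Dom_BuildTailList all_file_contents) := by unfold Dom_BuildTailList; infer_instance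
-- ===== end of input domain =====

-- B replaces A's boolean-flag single pass by a two-phase decomposition (find the tail
-- after the first ATOM line, then filter out ATOM lines); simpler, same cost.

-- ===== PORT A =====
-- the loop body of A, over the state (tail_list, after_atom)
def pvStepA (acc : List String × Bool) (line : String) : List String × Bool :=
  if !PySem.Str.startswith line "ATOM" && acc.2 == false then acc
  else if PySem.Str.startswith line "ATOM" then (acc.1, true)
  else if !PySem.Str.startswith line "ATOM" && acc.2 == true then (acc.1 ++ [line], acc.2)
  else acc

def BuildTailList (all_file_contents : List String) : List String :=
  (all_file_contents.foldl pvStepA (([] : List String), false)).1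

-- ===== PORT B =====
-- _after_first_atom: the list after the first ATOM-prefixed line, [] if none
def afterFirstAtom : List String → List String
  | [] => []
  | line :: rest =>
      if PySem.Str.startswith line "ATOM" then rest else afterFirstAtom rest

def BuildTailList_alt (all_file_contents : List String) : List String :=
  (afterFirstAtom all_file_contents).filter (fun line => !PySem.Str.startswith line "ATOM")

-- ===== PRECONDITION & SPEC =====
def Spec_BuildTailList (all_file_contents : List String) (out : List String) : Prop := out = BuildTailList_alt all_file_contents
instance (all_file_contents : List String) (out : List String) : Decidable (Spec_BuildTailList all_file_contents out) := by unfold Spec_BuildTailList; infer_instance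

-- ===== CLAIM (what is proved, stated in full; the proofs are below) =====
def Claim_equal_BuildTailList : Prop := ∀ (all_file_contents : List String), Dom_BuildTailList all_file_contents → Spec_BuildTailList all_file_contents (BuildTailList all_file_contents)

-- ===== LEMMAS AND PROOFS =====
-- Once the flag is true, A appends exactly the non-ATOM lines of the remainder.
theorem foldlA_true (xs : List String) (acc : List String) :
    (xs.foldl pvStepA (acc, true)).1
      = acc ++ xs.filter (fun line => !PySem.Str.startswith line "ATOM") := by
  induction xs generalizing acc with
  | nil => simp
  | cons x xs ih =>
    by_cases h : PySem.Chars.startswith x.toList (['A','T','O','M']) = true <;>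
      simp [pvStepA, h, ih, List.filter_cons]

-- While the flag is false, A skips until the first ATOM line.
theorem foldlA_false (xs : List String) (acc : List String) :
    (xs.foldl pvStepA (acc, false)).1
      = acc ++ (afterFirstAtom xs).filter (fun line => !PySem.Str.startswith line "ATOM") := by
  induction xs generalizing acc with
  | nil => simp [afterFirstAtom]
  | cons x xs ih =>
    by_cases h : PySem.Chars.startswith x.toList (['A','T','O','M']) = true
    · simp [pvStepA, h, afterFirstAtom, foldlA_true]
    · simp [pvStepA, h, afterFirstAtom, ih]

-- ===== VERDICT (by name: the statement is the Claim_ definition above) =====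
theorem BuildTailList_spec : Claim_equal_BuildTailList := by
  intro xs _
  show BuildTailList xs = BuildTailList_alt xs
  simp [BuildTailList, BuildTailList_alt, foldlA_false]
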